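-- pv_equiv track=rewrite | github.com/juanlucasantoliquido/Stacky | Stacky tools/QA UAT Agent/session_to_playbook.py | _find_stable_element
-- ===== SOURCE A (Python) =====
-- def _find_stable_element(screen: str, discovered_selectors: dict) -> str:
--     """Find a stable, recognizable element to wait for after navigating to a screen."""
--     disc = discovered_selectors.get(screen, {})
--     # Prefer a tab link, a button, or a grid header — something meaningful
--     preference_keys = ["usuarios", "roles", "grid", "btn", "tab"]
--     for pref in preference_keys:
--         for key, sel in disc.items():
--             if pref in key.lower() and sel and sel.startswith("#"):
--                 return sel
--     # Fallback: first #id selector found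
--     for sel in disc.values():
--         if sel and sel.startswith("#"):
--             return sel
--     return ""
-- ===== SOURCE B (Python) =====
-- def _find_stable_element(screen: str, discovered_selectors: dict) -> str:
--     """Single pass: rank each valid #id selector by the first matching preference
--     key (5 = no preference) and keep the earliest lowest-ranked one."""
--     disc = discovered_selectors.get(screen, {})
--     preference_keys = ["usuarios", "roles", "grid", "btn", "tab"]
--     best_rank = None
--     best_sel = ""
--     for key, sel in disc.items():
--         if sel and sel.startswith("#"):
--             k = key.lower()
--             rank = next((i for i, p in enumerate(preference_keys) if p in k), 5)
--             if best_rank is None or rank < best_rank: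
--                 best_rank, best_sel = rank, sel
--     return best_sel
-- ===== Notes on version B (the rewrite author's own statement) =====
-- stated objective: alternative
-- what changed: A's five sequential preference passes plus a fallback pass over the selector dict are collapsed into a single pass that ranks each valid #id selector by its first matching preference key (5 if none) and keeps the earliest lowest-ranked one.
import Mathlib
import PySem

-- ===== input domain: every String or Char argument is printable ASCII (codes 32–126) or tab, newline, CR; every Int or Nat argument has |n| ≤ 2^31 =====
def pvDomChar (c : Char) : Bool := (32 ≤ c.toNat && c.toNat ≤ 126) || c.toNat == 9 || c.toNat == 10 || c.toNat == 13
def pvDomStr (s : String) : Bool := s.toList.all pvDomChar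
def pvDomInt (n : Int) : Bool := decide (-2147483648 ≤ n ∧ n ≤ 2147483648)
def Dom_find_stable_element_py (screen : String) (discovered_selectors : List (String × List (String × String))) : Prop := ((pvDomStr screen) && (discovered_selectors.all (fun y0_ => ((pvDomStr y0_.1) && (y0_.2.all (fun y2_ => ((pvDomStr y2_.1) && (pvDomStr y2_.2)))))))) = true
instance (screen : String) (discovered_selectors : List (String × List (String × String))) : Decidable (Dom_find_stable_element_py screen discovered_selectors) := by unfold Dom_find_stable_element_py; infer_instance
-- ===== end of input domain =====

-- B replaces A's six sequential scans (five preference passes + a fallback pass) by one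
-- rank-tracking pass over the items (objective: alternative decomposition).

-- ===== PORT A =====
-- literal transliteration of _find_stable_element: the early 'return's become Option
-- accumulators; 'sel and sel.startswith("#")' is exactly startswith (falsy "" has no "#" prefix)
def find_stable_element_py (screen : String) (discovered_selectors : List (String × List (String × String))) : String :=
  let disc := PySem.Dict.ofList ((PySem.Dict.ofList discovered_selectors).getD screen [])
  let preference_keys : List String := ["usuarios", "roles", "grid", "btn", "tab"]
  match preference_keys.foldl (fun (acc : Option String) pref =>
      match acc with
      | some s => some s
      | none =>
        disc.items.foldl (fun (acc2 : Option String) kv =>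
          match acc2 with
          | some s => some s
          | none =>
            if PySem.Str.isIn pref (PySem.Str.lower kv.1) && PySem.Str.startswith kv.2 "#"
            then some kv.2 else none) none) none with
  | some s => s
  | none =>
    match disc.values.foldl (fun (acc : Option String) sel =>
        match acc with
        | some s => some s
        | none => if PySem.Str.startswith sel "#" then some sel else none) none with
    | some s => s
    | none => ""

-- ===== PORT B =====
-- rank key = index of first preference substring of key.lower(), 5 if none  (B's 'next(..., 5)')
def pvRank (key : String) : Nat :=
  ((["usuarios", "roles", "grid", "btn", "tab"] : List String).findIdx?
    (fun p => PySem.Str.isIn p (PySem.Str.lower key))).getD 5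

-- B's loop body: keep the earliest lowest-ranked valid selector
def pvBStep (best : Option (Nat × String)) (kv : String × String) : Option (Nat × String) :=
  if PySem.Str.startswith kv.2 "#" then
    match best with
    | none => some (pvRank kv.1, kv.2)
    | some (br, bs) => if pvRank kv.1 < br then some (pvRank kv.1, kv.2) else some (br, bs)
  else best

def find_stable_element_py_alt (screen : String) (discovered_selectors : List (String × List (String × String))) : String :=
  let disc := PySem.Dict.ofList ((PySem.Dict.ofList discovered_selectors).getD screen [])
  match disc.items.foldl pvBStep none with
  | some (_, s) => s
  | none => ""

-- ===== PRECONDITION & SPEC =====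
def Spec_find_stable_element_py (screen : String) (discovered_selectors : List (String × List (String × String))) (out : String) : Prop := out = find_stable_element_py_alt screen discovered_selectors
instance (screen : String) (discovered_selectors : List (String × List (String × String))) (out : String) : Decidable (Spec_find_stable_element_py screen discovered_selectors out) := by unfold Spec_find_stable_element_py; infer_instance

-- ===== CLAIM (what is proved, stated in full; the proofs are below) =====
def Claim_equal_find_stable_element_py : Prop := ∀ (screen : String) (discovered_selectors : List (String × List (String × String))), Dom_find_stable_element_py screen discovered_selectors → Spec_find_stable_element_py screen discovered_selectors (find_stable_element_py screen discovered_selectors)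

-- ===== LEMMAS AND PROOFS =====

def pvValid (e : String × String) : Bool := PySem.Str.startswith e.2 "#"

def pvPrefs : List String := ["usuarios", "roles", "grid", "btn", "tab"]

def pvC (i : Nat) (e : String × String) : Bool :=
  PySem.Str.isIn (pvPrefs.getD i "") (PySem.Str.lower e.1) && pvValid e

-- "first valid entry of globally minimal rank", computed back-to-front (head wins ties)
def pvFm : List (String × String) → Option (Nat × String)
  | [] => none
  | e :: t =>
    if pvValid e then
      match pvFm t with
      | none => some (pvRank e.1, e.2)
      | some (r, s) => if pvRank e.1 ≤ r then some (pvRank e.1, e.2) else some (r, s)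
    else pvFm t

lemma pvRank_eq (k : String) :
    pvRank k =
      if PySem.Str.isIn "usuarios" (PySem.Str.lower k) then 0
      else if PySem.Str.isIn "roles" (PySem.Str.lower k) then 1
      else if PySem.Str.isIn "grid" (PySem.Str.lower k) then 2
      else if PySem.Str.isIn "btn" (PySem.Str.lower k) then 3
      else if PySem.Str.isIn "tab" (PySem.Str.lower k) then 4
      else 5 := by
  simp only [pvRank, List.findIdx?_cons, List.findIdx?_nil]
  split_ifs <;> rfl

lemma pvRank_le5 (k : String) : pvRank k ≤ 5 := by
  rw [pvRank_eq]; split_ifs <;> omega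

lemma pvRank_le_of_hit (k : String) (j : Nat) (hj : j < 5)
    (h : PySem.Str.isIn (pvPrefs.getD j "") (PySem.Str.lower k) = true) : pvRank k ≤ j := by
  rw [pvRank_eq]
  interval_cases j <;> simp only [pvPrefs, List.getD] at h <;>
    simp at h <;> split_ifs <;> simp_all <;> omega

lemma pvRank_min (k : String) (j : Nat) (hj : j < pvRank k) (hj5 : j < 5) :
    PySem.Str.isIn (pvPrefs.getD j "") (PySem.Str.lower k) = false := by
  by_contra h
  simp only [Bool.not_eq_false] at h
  exact absurd (pvRank_le_of_hit k j hj5 h) (by omega)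

lemma pvRank_hit (k : String) (h : pvRank k < 5) :
    PySem.Str.isIn (pvPrefs.getD (pvRank k) "") (PySem.Str.lower k) = true := by
  rw [pvRank_eq] at h ⊢
  split_ifs at h ⊢ <;> simp_all [pvPrefs, List.getD]

-- early-return scan = find?
lemma pvScan_eq_find (l : List (String × String)) (p : String × String → Bool) :
    l.foldl (fun (acc : Option String) kv =>
      match acc with
      | some s => some s
      | none => if p kv then some kv.2 else none) none = (l.find? p).map (·.2) := by
  have gen : ∀ (l : List (String × String)) (s : String),
      l.foldl (fun (acc : Option String) kv =>
        match acc with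
        | some s => some s
        | none => if p kv then some kv.2 else none) (some s) = some s := by
    intro l s; induction l <;> simp_all [List.foldl]
  induction l with
  | nil => rfl
  | cons e t ih =>
    by_cases h : p e = true <;> simp [List.foldl, List.find?_cons, h, gen, ih]

lemma pvScan_eq_find_val (l : List String) (q : String → Bool) :
    l.foldl (fun (acc : Option String) sel =>
      match acc with
      | some s => some s
      | none => if q sel then some sel else none) none = l.find? q := by
  have gen : ∀ (l : List String) (s : String),
      l.foldl (fun (acc : Option String) sel =>
        match acc with
        | some s => some s
        | none => if q sel then some sel else none) (some s) = some s := by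
    intro l s; induction l <;> simp_all [List.foldl]
  induction l with
  | nil => rfl
  | cons e t ih =>
    by_cases h : q e = true <;> simp [List.foldl, List.find?_cons, h, gen, ih]

lemma pvFm_cons_true (e : String × String) (t : List (String × String))
    (hv : pvValid e = true) :
    pvFm (e :: t) =
      match pvFm t with
      | none => some (pvRank e.1, e.2)
      | some (r, s) => if pvRank e.1 ≤ r then some (pvRank e.1, e.2) else some (r, s) := by
  simp [pvFm, hv]

lemma pvFm_cons_false (e : String × String) (t : List (String × String))
    (hv : pvValid e = false) : pvFm (e :: t) = pvFm t := by
  simp [pvFm, hv]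

lemma pvFm_none (l : List (String × String)) :
    pvFm l = none ↔ l.find? pvValid = none := by
  induction l with
  | nil => simp [pvFm]
  | cons e t ih =>
    by_cases hv : pvValid e = true
    · rw [pvFm_cons_true e t hv]
      rcases ht : pvFm t with _ | ⟨r', s'⟩
      · simp [List.find?_cons, hv]
      · simp only [List.find?_cons, hv]
        constructor
        · intro h; split_ifs at h <;> simp at h
        · intro h; simp at h
    · have hv' : pvValid e = false := by simpa using hv
      rw [pvFm_cons_false e t hv']
      simp [List.find?_cons, hv', ih]

lemma pvFind_none_of_valid_none (l : List (String × String)) (j : Nat)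
    (h : l.find? pvValid = none) : l.find? (pvC j) = none := by
  rw [List.find?_eq_none] at h ⊢
  intro x hx
  have hv := h x hx
  simp only [pvC, Bool.and_eq_true, not_and] at *
  intro _; exact hv

lemma pvFm_rank_le5 (l : List (String × String)) (r : Nat) (s : String)
    (h : pvFm l = some (r, s)) : r ≤ 5 := by
  induction l generalizing r s with
  | nil => simp [pvFm] at h
  | cons e t ih =>
    by_cases hv : pvValid e = true
    · rw [pvFm_cons_true e t hv] at h
      rcases ht : pvFm t with _ | ⟨r', s'⟩
      · simp only [ht] at h
        simp only [Option.some.injEq, Prod.mk.injEq] at h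
        have := pvRank_le5 e.1; omega
      · simp only [ht] at h
        have hr' := ih r' s' ht
        have := pvRank_le5 e.1
        split_ifs at h <;> simp only [Option.some.injEq, Prod.mk.injEq] at h <;>
          obtain ⟨h1, -⟩ := h <;> omega
    · have hv' : pvValid e = false := by simpa using hv
      rw [pvFm_cons_false e t hv'] at h
      exact ih r s h

lemma pvFm_spec (l : List (String × String)) (r : Nat) (s : String)
    (h : pvFm l = some (r, s)) :
    (∀ j, j < r → j < 5 → l.find? (pvC j) = none) ∧
    (r < 5 → (l.find? (pvC r)).map (·.2) = some s) ∧
    (r = 5 → (l.find? pvValid).map (·.2) = some s) := by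
  induction l generalizing r s with
  | nil => simp [pvFm] at h
  | cons e t ih =>
    by_cases hv : pvValid e = true
    · rw [pvFm_cons_true e t hv] at h
      rcases ht : pvFm t with _ | ⟨r', s'⟩
      · simp only [ht, Option.some.injEq, Prod.mk.injEq] at h
        obtain ⟨hr, hs⟩ := h
        have hnone := (pvFm_none t).mp ht
        subst hr; subst hs
        refine ⟨fun j hj hj5 => ?_, fun h5 => ?_, fun h5 => ?_⟩
        · have hhd : pvC j e = false := by
            unfold pvC; rw [pvRank_min e.1 j hj hj5]; rfl
          simp [List.find?_cons, hhd, pvFind_none_of_valid_none t j hnone]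
        · have hhd : pvC (pvRank e.1) e = true := by
            unfold pvC; rw [pvRank_hit e.1 h5, hv]; rfl
          have hstep : List.find? (pvC (pvRank e.1)) (e :: t) = some e := by
            simp [List.find?_cons, hhd]
          rw [hstep]; rfl
        · have hstep : List.find? pvValid (e :: t) = some e := by
            simp [List.find?_cons, hv]
          rw [hstep]; rfl
      · simp only [ht] at h
        obtain ⟨ih1, ih2, ih3⟩ := ih r' s' ht
        split_ifs at h with hle <;> simp only [Option.some.injEq, Prod.mk.injEq] at h <;>
          obtain ⟨hr, hs⟩ := h
        · subst hr; subst hs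
          refine ⟨fun j hj hj5 => ?_, fun h5 => ?_, fun h5 => ?_⟩
          · have hhd : pvC j e = false := by
              unfold pvC; rw [pvRank_min e.1 j hj hj5]; rfl
            simp [List.find?_cons, hhd, ih1 j (by omega) hj5]
          · have hhd : pvC (pvRank e.1) e = true := by
              unfold pvC; rw [pvRank_hit e.1 h5, hv]; rfl
            have hstep : List.find? (pvC (pvRank e.1)) (e :: t) = some e := by
              simp [List.find?_cons, hhd]
            rw [hstep]; rfl
          · have hstep : List.find? pvValid (e :: t) = some e := by
              simp [List.find?_cons, hv]
            rw [hstep]; rfl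
        · subst hr; subst hs
          have hr5 : r' < 5 := by
            have := pvRank_le5 e.1; omega
          refine ⟨fun j hj hj5 => ?_, fun _ => ?_, fun h5 => ?_⟩
          · have hhd : pvC j e = false := by
              unfold pvC; rw [pvRank_min e.1 j (by omega) hj5]; rfl
            simp [List.find?_cons, hhd, ih1 j hj hj5]
          · have hhd : pvC r' e = false := by
              unfold pvC; rw [pvRank_min e.1 r' (by omega) hr5]; rfl
            have hstep : List.find? (pvC r') (e :: t) = List.find? (pvC r') t := by
              simp [List.find?_cons, hhd]
            rw [hstep]; exact ih2 hr5
          · omega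
    · have hv' : pvValid e = false := by simpa using hv
      rw [pvFm_cons_false e t hv'] at h
      obtain ⟨ih1, ih2, ih3⟩ := ih r s h
      refine ⟨fun j hj hj5 => ?_, fun h5 => ?_, fun h5 => ?_⟩
      · have hhd : pvC j e = false := by
          unfold pvC; rw [hv']; exact Bool.and_false _
        simp [List.find?_cons, hhd, ih1 j hj hj5]
      · have hhd : pvC r e = false := by
          unfold pvC; rw [hv']; exact Bool.and_false _
        have hstep : List.find? (pvC r) (e :: t) = List.find? (pvC r) t := by
          simp [List.find?_cons, hhd]
        rw [hstep]; exact ih2 h5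
      · have hstep : List.find? pvValid (e :: t) = List.find? pvValid t := by
          simp [List.find?_cons, hv']
        rw [hstep]; exact ih3 h5

-- B's loop-body rewrite rules
lemma pvBStep_valid_none (e : String × String)
    (hv : PySem.Str.startswith e.2 "#" = true) :
    pvBStep none e = some (pvRank e.1, e.2) := by
  unfold pvBStep; rw [hv]; rfl

lemma pvBStep_valid_lt (e : String × String) (r : Nat) (s : String)
    (hv : PySem.Str.startswith e.2 "#" = true) (hlt : pvRank e.1 < r) :
    pvBStep (some (r, s)) e = some (pvRank e.1, e.2) := by
  unfold pvBStep; rw [hv]; simp [hlt]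

lemma pvBStep_valid_ge (e : String × String) (r : Nat) (s : String)
    (hv : PySem.Str.startswith e.2 "#" = true) (hlt : ¬ pvRank e.1 < r) :
    pvBStep (some (r, s)) e = some (r, s) := by
  unfold pvBStep; rw [hv]; simp [hlt]

lemma pvBStep_invalid (e : String × String) (acc : Option (Nat × String))
    (hv : PySem.Str.startswith e.2 "#" = false) :
    pvBStep acc e = acc := by
  unfold pvBStep; rw [hv]; rfl

-- B's left fold from an arbitrary accumulator, in terms of pvFm
lemma pvBfold_some (l : List (String × String)) (r : Nat) (s : String) :
    l.foldl pvBStep (some (r, s)) =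
      (match pvFm l with
       | none => some (r, s)
       | some (r', s') => if r' < r then some (r', s') else some (r, s)) := by
  induction l generalizing r s with
  | nil => simp [pvFm]
  | cons e t ih =>
    rw [List.foldl_cons]
    by_cases hv : PySem.Str.startswith e.2 "#" = true
    · have hvv : pvValid e = true := hv
      rw [pvFm_cons_true e t hvv]
      by_cases hlt : pvRank e.1 < r
      · rw [pvBStep_valid_lt e r s hv hlt, ih]
        rcases pvFm t with _ | ⟨r', s'⟩
        · show some (pvRank e.1, e.2) =
            if pvRank e.1 < r then some (pvRank e.1, e.2) else some (r, s)
          rw [if_pos hlt]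
        · by_cases h1 : r' < pvRank e.1
          · simp only [if_pos h1, if_neg (show ¬ pvRank e.1 ≤ r' by omega)]
            rw [if_pos (show r' < r by omega)]
          · simp only [if_neg h1, if_pos (show pvRank e.1 ≤ r' by omega)]
            rw [if_pos hlt]
      · rw [pvBStep_valid_ge e r s hv hlt, ih]
        rcases pvFm t with _ | ⟨r', s'⟩
        · show some (r, s) =
            if pvRank e.1 < r then some (pvRank e.1, e.2) else some (r, s)
          rw [if_neg hlt]
        · by_cases h1 : pvRank e.1 ≤ r'
          · simp only [if_pos h1]
            rw [if_neg (show ¬ r' < r by omega), if_neg hlt]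
          · simp only [if_neg h1]
    · have hv' : PySem.Str.startswith e.2 "#" = false := by simpa using hv
      have hvv : pvValid e = false := hv'
      rw [pvBStep_invalid e _ hv', ih, pvFm_cons_false e t hvv]

lemma pvBfold_none (l : List (String × String)) :
    l.foldl pvBStep none = pvFm l := by
  cases l with
  | nil => rfl
  | cons e t =>
    rw [List.foldl_cons]
    by_cases hv : PySem.Str.startswith e.2 "#" = true
    · have hvv : pvValid e = true := hv
      rw [pvBStep_valid_none e hv, pvBfold_some, pvFm_cons_true e t hvv]
      rcases pvFm t with _ | ⟨r', s'⟩
      · rfl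
      · by_cases h1 : r' < pvRank e.1
        · simp only [if_pos h1, if_neg (show ¬ pvRank e.1 ≤ r' by omega)]
        · simp only [if_neg h1, if_pos (show pvRank e.1 ≤ r' by omega)]
    · have hv' : PySem.Str.startswith e.2 "#" = false := by simpa using hv
      have hvv : pvValid e = false := hv'
      rw [pvBStep_invalid e _ hv', pvBfold_none t, pvFm_cons_false e t hvv]

-- fallback scan over values = find? over items
lemma pvFind_map (l : List (String × String)) :
    (l.map (·.2)).find? (fun sel => PySem.Str.startswith sel "#") =
      (l.find? pvValid).map (·.2) := by
  induction l with
  | nil => rfl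
  | cons e t ih =>
    by_cases hv : pvValid e = true
    · have hv' : PySem.Str.startswith e.2 "#" = true := hv
      have hvc : PySem.Chars.startswith e.2.toList ['#'] = true := by simpa using hv'
      simp [List.find?_cons, hv, hv', hvc]
    · have hv0 : pvValid e = false := by simpa using hv
      have hv' : PySem.Str.startswith e.2 "#" = false := hv0
      have hvc : PySem.Chars.startswith e.2.toList ['#'] = false := by simpa using hv'
      simp only [List.map_cons, List.find?_cons, hv0, hv', hvc]
      simpa using ih

-- the two loop structures agree over an arbitrary items list
lemma pvCore_eq (l : List (String × String)) :
    (match (["usuarios", "roles", "grid", "btn", "tab"] : List String).foldl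
        (fun (acc : Option String) pref =>
          match acc with
          | some s => some s
          | none =>
            l.foldl (fun (acc2 : Option String) kv =>
              match acc2 with
              | some s => some s
              | none =>
                if PySem.Str.isIn pref (PySem.Str.lower kv.1) && PySem.Str.startswith kv.2 "#"
                then some kv.2 else none) none) none with
     | some s => s
     | none =>
       match (l.map (·.2)).foldl (fun (acc : Option String) sel =>
           match acc with
           | some s => some s
           | none => if PySem.Str.startswith sel "#" then some sel else none) none with
       | some s => s
       | none => "") =
    (match l.foldl pvBStep none with
     | some (_, s) => s
     | none => "") := by
  have h0 : l.foldl (fun (acc2 : Option String) kv =>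
      match acc2 with
      | some s => some s
      | none =>
        if PySem.Str.isIn "usuarios" (PySem.Str.lower kv.1) && PySem.Str.startswith kv.2 "#"
        then some kv.2 else none) none = (l.find? (pvC 0)).map (·.2) := pvScan_eq_find l (pvC 0)
  have h1 : l.foldl (fun (acc2 : Option String) kv =>
      match acc2 with
      | some s => some s
      | none =>
        if PySem.Str.isIn "roles" (PySem.Str.lower kv.1) && PySem.Str.startswith kv.2 "#"
        then some kv.2 else none) none = (l.find? (pvC 1)).map (·.2) := pvScan_eq_find l (pvC 1)
  have h2 : l.foldl (fun (acc2 : Option String) kv =>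
      match acc2 with
      | some s => some s
      | none =>
        if PySem.Str.isIn "grid" (PySem.Str.lower kv.1) && PySem.Str.startswith kv.2 "#"
        then some kv.2 else none) none = (l.find? (pvC 2)).map (·.2) := pvScan_eq_find l (pvC 2)
  have h3 : l.foldl (fun (acc2 : Option String) kv =>
      match acc2 with
      | some s => some s
      | none =>
        if PySem.Str.isIn "btn" (PySem.Str.lower kv.1) && PySem.Str.startswith kv.2 "#"
        then some kv.2 else none) none = (l.find? (pvC 3)).map (·.2) := pvScan_eq_find l (pvC 3)
  have h4 : l.foldl (fun (acc2 : Option String) kv =>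
      match acc2 with
      | some s => some s
      | none =>
        if PySem.Str.isIn "tab" (PySem.Str.lower kv.1) && PySem.Str.startswith kv.2 "#"
        then some kv.2 else none) none = (l.find? (pvC 4)).map (·.2) := pvScan_eq_find l (pvC 4)
  have hfall : (l.map (·.2)).foldl (fun (acc : Option String) sel =>
      match acc with
      | some s => some s
      | none => if PySem.Str.startswith sel "#" then some sel else none) none =
      (l.find? pvValid).map (·.2) := by
    rw [pvScan_eq_find_val (l.map (·.2)) (fun sel => PySem.Str.startswith sel "#")]
    exact pvFind_map l
  rw [pvBfold_none]
  simp only [List.foldl_cons, List.foldl_nil]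
  rw [h0]
  rcases hfm : pvFm l with _ | ⟨r, s⟩
  · have hvnone := (pvFm_none l).mp hfm
    have hn : ∀ j, l.find? (pvC j) = none := fun j => pvFind_none_of_valid_none l j hvnone
    rw [hn 0, h1, hn 1, h2, hn 2, h3, hn 3, h4, hn 4, hfall, hvnone]
    rfl
  · have hr5 := pvFm_rank_le5 l r s hfm
    obtain ⟨hA1, hA2, hA3⟩ := pvFm_spec l r s hfm
    interval_cases r
    · rw [hA2 (by omega)]
    · rw [hA1 0 (by omega) (by omega), h1, hA2 (by omega)]; rfl
    · rw [hA1 0 (by omega) (by omega), h1, hA1 1 (by omega) (by omega), h2, hA2 (by omega)]; rfl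
    · rw [hA1 0 (by omega) (by omega), h1, hA1 1 (by omega) (by omega), h2,
        hA1 2 (by omega) (by omega), h3, hA2 (by omega)]; rfl
    · rw [hA1 0 (by omega) (by omega), h1, hA1 1 (by omega) (by omega), h2,
        hA1 2 (by omega) (by omega), h3, hA1 3 (by omega) (by omega), h4, hA2 (by omega)]; rfl
    · rw [hA1 0 (by omega) (by omega), h1, hA1 1 (by omega) (by omega), h2,
        hA1 2 (by omega) (by omega), h3, hA1 3 (by omega) (by omega), h4,
        hA1 4 (by omega) (by omega), hfall, hA3 rfl]; rfl

-- ===== VERDICT (by name: the statement is the Claim_ definition above) =====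
theorem find_stable_element_py_spec : Claim_equal_find_stable_element_py := by
  intro screen ds _
  show find_stable_element_py screen ds = find_stable_element_py_alt screen ds
  unfold find_stable_element_py find_stable_element_py_alt
  exact pvCore_eq _
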